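-- pv_equiv track=rewrite | github.com/sp9028/P1 | Rešitve starih izpitov/14.8. (Marsovci).py | letala
-- ===== SOURCE A (Python) =====
-- from collections import defaultdict
--
-- def vsebovanost(krogi):
--     vsebuje = defaultdict(list)
--     notranji = set()
--
--     for krog0 in krogi:
--         for krog1 in krogi:
--             x0, y0, r0 = krog0
--             x1, y1, r1 = krog1
--             if r0 > r1 and (x1 - x0) ** 2 + (y1 - y0) ** 2 < r0 ** 2:
--                 vsebuje[krog0].append(krog1)
--                 notranji.add(krog1)
--
--     return vsebuje, notranji
--
-- def letala(krogi):
--     vsa_letala = set()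
--     vsebuje,notranji = vsebovanost(krogi)
--     for krog in krogi:
--         if krog not in notranji:
--             if len(vsebuje[krog]) != 2 and len(vsebuje[krog]) != 0:
--                 for vkrog in vsebuje[krog]:
--                     if vkrog in vsebuje:
--                         break
--                 else:
--                     vsa_letala.add(krog[:2])
--     return vsa_letala
-- ===== SOURCE B (Python) =====
-- def letala(krogi):
--     def contains(a, b):
--         x0, y0, r0 = a
--         x1, y1, r1 = b
--         return r0 > r1 and (x1 - x0) ** 2 + (y1 - y0) ** 2 < r0 ** 2
--
--     rezultat = set()
--     for c in krogi:
--         if any(contains(o, c) for o in krogi):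
--             continue  # c lies strictly inside another circle
--         kids = [d for d in krogi if contains(c, d)]
--         if len(kids) in (0, 2):
--             continue
--         if any(any(contains(k, e) for e in krogi) for k in kids):
--             continue  # some child contains a circle itself
--         rezultat.add(c[:2])
--     return rezultat
-- ===== Notes on version B (the rewrite author's own statement) =====
-- stated objective: simpler
-- what changed: B drops A's precomputed containment dictionary and inner-circle set and decides each candidate directly with fresh scans of the list (enclosed-by test, direct-child collection, per-child leaf test), counting each distinct child occurrence once.
-- intended difference: On lists where some outermost circle c whose children are all leaves is duplicated so the duplication distorts its child count across the {0,2} exclusion (2 copies with 1 child, or >=2 copies with 2 children), A appends the children once per copy of c so its dictionary count m*L wrongly hits or misses the exclusion (e.g. on [(0,0,10),(0,0,10),(0,0,1)] A returns set() while B returns {(0, 0)}); B counts each child once, which is the intended child count. — e.g. on letala([(0,0,10),(0,0,10),(0,0,1)]): A returns [], B returns [(0,0)]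
import Mathlib
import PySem

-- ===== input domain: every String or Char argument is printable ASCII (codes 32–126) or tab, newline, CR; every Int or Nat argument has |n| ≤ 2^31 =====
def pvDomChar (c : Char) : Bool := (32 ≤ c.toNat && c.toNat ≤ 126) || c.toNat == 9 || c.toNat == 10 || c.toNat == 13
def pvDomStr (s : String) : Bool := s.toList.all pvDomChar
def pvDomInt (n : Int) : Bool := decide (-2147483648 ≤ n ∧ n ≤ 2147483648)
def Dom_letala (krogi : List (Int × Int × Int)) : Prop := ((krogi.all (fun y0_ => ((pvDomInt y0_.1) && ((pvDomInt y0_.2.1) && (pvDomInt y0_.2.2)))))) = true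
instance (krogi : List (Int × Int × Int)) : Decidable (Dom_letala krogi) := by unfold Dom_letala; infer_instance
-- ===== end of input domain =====

-- B replaces A's precomputed containment dictionary/set with per-candidate rescans of the list (objective: simpler, no index).

-- shared geometric test: circle a strictly contains circle b (identical inequality in both Pythons)
def pvCont (a b : Int × Int × Int) : Bool :=
  decide (a.2.2 > b.2.2 ∧ (b.1 - a.1) ^ 2 + (b.2.1 - a.2.1) ^ 2 < a.2.2 ^ 2)

-- ===== PORT A =====
def vsebovanost (krogi : List (Int × Int × Int)) :
    PySem.Dict (Int × Int × Int) (List (Int × Int × Int)) × PySem.Set (Int × Int × Int) :=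
  krogi.foldl (fun st krog0 =>
    krogi.foldl (fun st krog1 =>
      if pvCont krog0 krog1 then
        (PySem.Dict.modify st.1 krog0 [] (· ++ [krog1]), PySem.Set.add st.2 krog1)
      else st) st)
    (PySem.Dict.empty, PySem.Set.empty)

-- 'len(vsebuje[krog])' on the defaultdict inserts key krog when absent: ported as setdefault, the dict is threaded through the loop
def letala (krogi : List (Int × Int × Int)) : List (Int × Int) :=
  let vn := vsebovanost krogi
  (List.foldl (fun st krog =>
      if PySem.Set.contains vn.2 krog = false then
        let d := PySem.Dict.setdefault st.1 krog []
        let l := PySem.Dict.getD d krog []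
        if l.length ≠ 2 ∧ l.length ≠ 0 then
          -- 'for vkrog in …: if vkrog in vsebuje: break / else: add' = add unless some vkrog is a key
          if l.any (fun vkrog => PySem.Dict.contains d vkrog) then (d, st.2)
          else (d, PySem.Set.add st.2 (krog.1, krog.2.1))
        else (d, st.2)
      else st) (vn.1, PySem.Set.empty) krogi).2

-- ===== PORT B =====
def letala_alt (krogi : List (Int × Int × Int)) : List (Int × Int) :=
  List.foldl (fun rezultat c =>
    if krogi.any (fun o => pvCont o c) then rezultat
    else
      let kids := krogi.filter (fun d => pvCont c d)
      if kids.length = 0 ∨ kids.length = 2 then rezultat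
      else if kids.any (fun k => krogi.any (fun e => pvCont k e)) then rezultat
      else PySem.Set.add rezultat (c.1, c.2.1))
    PySem.Set.empty krogi

-- ===== PRECONDITION & SPEC =====
-- On lists where some outermost circle c with only leaf children is duplicated and the
-- duplication distorts its child count across the {0,2} exclusion (2 copies with 1 child, or
-- ≥2 copies with 2 children), A appends c's children once per copy of c so its count m·L wrongly
-- hits or misses the exclusion and A drops or keeps c's centre wrongly; B counts each child once,
-- the intended child count.
def D_letala (krogi : List (Int × Int × Int)) : Prop :=
  ∃ c ∈ krogi, (krogi.any fun o => pvCont o c) = false ∧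
    let K := krogi.filter (pvCont c)
    (K.any fun k => krogi.any (pvCont k)) = false ∧
    ¬(krogi.count c * K.length = 2 ↔ K.length = 2)
instance (krogi : List (Int × Int × Int)) : Decidable (D_letala krogi) := by
  unfold D_letala; infer_instance

def Spec_letala (krogi : List (Int × Int × Int)) (out : List (Int × Int)) : Prop :=
  ¬ D_letala krogi → out = letala_alt krogi
instance (krogi : List (Int × Int × Int)) (out : List (Int × Int)) : Decidable (Spec_letala krogi out) := by unfold Spec_letala; infer_instance

def pvDiffWitness_letala : (List (Int × Int × Int)) := [(0,0,10),(0,0,10),(0,0,1)]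
def pvDiffWitnessOut_letala : (List (Int × Int)) × (List (Int × Int)) := ([], [(0,0)])

-- ===== CLAIM (what is proved, stated in full; the proofs are below) =====
def Claim_unchanged_letala : Prop := ∀ (krogi : List (Int × Int × Int)), Dom_letala krogi → Spec_letala krogi (letala krogi)
def Claim_changed_letala : Prop := Dom_letala (pvDiffWitness_letala) ∧ D_letala (pvDiffWitness_letala) ∧ letala (pvDiffWitness_letala) = pvDiffWitnessOut_letala.1 ∧ letala_alt (pvDiffWitness_letala) = pvDiffWitnessOut_letala.2 ∧ pvDiffWitnessOut_letala.1 ≠ pvDiffWitnessOut_letala.2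
def Claim_exact_letala : Prop := ∀ (krogi : List (Int × Int × Int)), Dom_letala krogi → D_letala krogi → letala krogi ≠ letala_alt krogi

-- ===== LEMMAS AND PROOFS =====

-- the set component of vsebovanost's inner loop
theorem pv_inner_mem (krog0 : Int × Int × Int) (inner : List (Int × Int × Int))
    (st : PySem.Dict (Int × Int × Int) (List (Int × Int × Int)) × PySem.Set (Int × Int × Int))
    (x : Int × Int × Int) :
    x ∈ (inner.foldl (fun st krog1 =>
      if pvCont krog0 krog1 then
        (PySem.Dict.modify st.1 krog0 [] (· ++ [krog1]), PySem.Set.add st.2 krog1)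
      else st) st).2
    ↔ x ∈ st.2 ∨ (x ∈ inner ∧ pvCont krog0 x = true) := by
  induction inner generalizing st with
  | nil => simp
  | cons k1 t ih =>
    simp only [List.foldl_cons]
    by_cases h : pvCont krog0 k1 = true
    · simp only [if_pos h, ih, PySem.Set.mem_add, List.mem_cons]
      constructor
      · rintro ((hs | rfl) | ⟨hm, hc⟩)
        · exact Or.inl hs
        · exact Or.inr ⟨Or.inl rfl, h⟩
        · exact Or.inr ⟨Or.inr hm, hc⟩
      · rintro (hs | ⟨(rfl | hm), hc⟩)
        · exact Or.inl (Or.inl hs)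
        · exact Or.inl (Or.inr rfl)
        · exact Or.inr ⟨hm, hc⟩
    · simp only [if_neg h, ih, List.mem_cons]
      constructor
      · rintro (hs | ⟨hm, hc⟩)
        · exact Or.inl hs
        · exact Or.inr ⟨Or.inr hm, hc⟩
      · rintro (hs | ⟨(rfl | hm), hc⟩)
        · exact Or.inl hs
        · exact absurd hc h
        · exact Or.inr ⟨hm, hc⟩

-- the set component of vsebovanost's double loop
theorem pv_set_mem (krogi outer : List (Int × Int × Int))
    (st : PySem.Dict (Int × Int × Int) (List (Int × Int × Int)) × PySem.Set (Int × Int × Int))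
    (x : Int × Int × Int) :
    x ∈ (outer.foldl (fun st krog0 =>
      krogi.foldl (fun st krog1 =>
        if pvCont krog0 krog1 then
          (PySem.Dict.modify st.1 krog0 [] (· ++ [krog1]), PySem.Set.add st.2 krog1)
        else st) st) st).2
    ↔ x ∈ st.2 ∨ ∃ k0 ∈ outer, x ∈ krogi ∧ pvCont k0 x = true := by
  induction outer generalizing st with
  | nil => simp
  | cons k0 t ih =>
    simp only [List.foldl_cons, ih, pv_inner_mem, List.mem_cons]
    constructor
    · rintro ((hs | ⟨hm, hc⟩) | ⟨k, hk, hm, hc⟩)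
      · exact Or.inl hs
      · exact Or.inr ⟨k0, Or.inl rfl, hm, hc⟩
      · exact Or.inr ⟨k, Or.inr hk, hm, hc⟩
    · rintro (hs | ⟨k, (rfl | hk), hm, hc⟩)
      · exact Or.inl (Or.inl hs)
      · exact Or.inl (Or.inr ⟨hm, hc⟩)
      · exact Or.inr ⟨k, hk, hm, hc⟩

-- the children list stored under key c by the inner loop
theorem pv_inner_getD (krog0 c : Int × Int × Int) (inner : List (Int × Int × Int))
    (st : PySem.Dict (Int × Int × Int) (List (Int × Int × Int)) × PySem.Set (Int × Int × Int)) :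
    ((inner.foldl (fun st krog1 =>
      if pvCont krog0 krog1 then
        (PySem.Dict.modify st.1 krog0 [] (· ++ [krog1]), PySem.Set.add st.2 krog1)
      else st) st).1).getD c []
    = st.1.getD c [] ++ (if krog0 = c then inner.filter (fun k1 => pvCont krog0 k1) else []) := by
  induction inner generalizing st with
  | nil => simp
  | cons k1 t ih =>
    simp only [List.foldl_cons]
    by_cases h : pvCont krog0 k1 = true
    · simp only [if_pos h, ih]
      by_cases hc : krog0 = c
      · subst hc
        rw [if_pos rfl, if_pos rfl, PySem.Dict.getD_modify_self, List.filter_cons_of_pos h]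
        simp
      · rw [if_neg hc, if_neg hc, PySem.Dict.getD_modify_of_ne _ _ _ (fun he => hc he.symm)]
    · simp only [if_neg h, ih]
      by_cases hc : krog0 = c
      · rw [if_pos hc, if_pos hc, List.filter_cons_of_neg (by simp [h])]
      · rw [if_neg hc, if_neg hc]

-- the children list stored under key c by the double loop
theorem pv_outer_getD (krogi outer : List (Int × Int × Int)) (c : Int × Int × Int)
    (st : PySem.Dict (Int × Int × Int) (List (Int × Int × Int)) × PySem.Set (Int × Int × Int)) :
    ((outer.foldl (fun st krog0 =>
      krogi.foldl (fun st krog1 =>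
        if pvCont krog0 krog1 then
          (PySem.Dict.modify st.1 krog0 [] (· ++ [krog1]), PySem.Set.add st.2 krog1)
        else st) st) st).1).getD c []
    = st.1.getD c [] ++ outer.flatMap (fun k0 =>
        if k0 = c then krogi.filter (fun k1 => pvCont c k1) else []) := by
  induction outer generalizing st with
  | nil => simp
  | cons k0 t ih =>
    simp only [List.foldl_cons, ih, pv_inner_getD, List.flatMap_cons]
    by_cases hc : k0 = c
    · subst hc; simp [List.append_assoc]
    · simp [hc]

-- key membership in the dict built by the inner loop
theorem pv_inner_contains (krog0 : Int × Int × Int) (inner : List (Int × Int × Int))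
    (st : PySem.Dict (Int × Int × Int) (List (Int × Int × Int)) × PySem.Set (Int × Int × Int))
    (x : Int × Int × Int) :
    ((inner.foldl (fun st krog1 =>
      if pvCont krog0 krog1 then
        (PySem.Dict.modify st.1 krog0 [] (· ++ [krog1]), PySem.Set.add st.2 krog1)
      else st) st).1).contains x
    = (st.1.contains x || (x == krog0 && inner.any (fun k1 => pvCont krog0 k1))) := by
  induction inner generalizing st with
  | nil => simp
  | cons k1 t ih =>
    simp only [List.foldl_cons, List.any_cons]
    by_cases h : pvCont krog0 k1 = true
    · simp only [ih, h, if_true]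
      rw [PySem.Dict.contains_modify]
      cases hx : (x == krog0) <;> cases hcs : st.1.contains x <;> simp
    · simp only [ih, Bool.eq_false_iff.mpr h]
      simp

-- key membership in the dict built by the double loop
theorem pv_outer_contains (krogi outer : List (Int × Int × Int))
    (st : PySem.Dict (Int × Int × Int) (List (Int × Int × Int)) × PySem.Set (Int × Int × Int))
    (x : Int × Int × Int) :
    ((outer.foldl (fun st krog0 =>
      krogi.foldl (fun st krog1 =>
        if pvCont krog0 krog1 then
          (PySem.Dict.modify st.1 krog0 [] (· ++ [krog1]), PySem.Set.add st.2 krog1)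
        else st) st) st).1).contains x
    = (st.1.contains x || outer.any (fun k0 => x == k0 && krogi.any (fun k1 => pvCont k0 k1))) := by
  induction outer generalizing st with
  | nil => simp
  | cons k0 t ih =>
    simp only [List.foldl_cons, ih, pv_inner_contains, List.any_cons, Bool.or_assoc]

theorem pv_flat_len (c : Int × Int × Int) (kids : List (Int × Int × Int))
    (outer : List (Int × Int × Int)) :
    (outer.flatMap (fun k0 => if k0 = c then kids else [])).length
    = outer.count c * kids.length := by
  induction outer with
  | nil => simp
  | cons k0 t ih =>
    simp only [List.flatMap_cons, List.length_append, ih, List.count_cons]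
    by_cases hc : k0 = c
    · subst hc; simp [Nat.add_mul, Nat.add_comm]
    · simp [hc]

theorem pv_flat_mem (x c : Int × Int × Int) (kids outer : List (Int × Int × Int)) :
    x ∈ outer.flatMap (fun k0 => if k0 = c then kids else []) ↔ c ∈ outer ∧ x ∈ kids := by
  simp only [List.mem_flatMap]
  constructor
  · rintro ⟨k0, hk0, hx⟩
    by_cases hc : k0 = c
    · subst hc; rw [if_pos rfl] at hx; exact ⟨hk0, hx⟩
    · rw [if_neg hc] at hx; simp at hx
  · rintro ⟨hc, hx⟩
    exact ⟨c, hc, by rw [if_pos rfl]; exact hx⟩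

-- characterizations of vsebovanost's two results
theorem pv_vseb_mem (krogi : List (Int × Int × Int)) (x : Int × Int × Int) :
    x ∈ (vsebovanost krogi).2 ↔ x ∈ krogi ∧ ∃ k0 ∈ krogi, pvCont k0 x = true := by
  unfold vsebovanost
  rw [pv_set_mem]
  simp only [PySem.Set.empty]
  constructor
  · rintro (h | ⟨k0, hk0, hm, hc⟩)
    · simp at h
    · exact ⟨hm, k0, hk0, hc⟩
  · rintro ⟨hm, k0, hk0, hc⟩
    exact Or.inr ⟨k0, hk0, hm, hc⟩

theorem pv_vseb_getD (krogi : List (Int × Int × Int)) (c : Int × Int × Int) :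
    (vsebovanost krogi).1.getD c []
    = krogi.flatMap (fun k0 => if k0 = c then krogi.filter (fun k1 => pvCont c k1) else []) := by
  unfold vsebovanost
  rw [pv_outer_getD]
  simp [PySem.Dict.getD_empty]

theorem pv_vseb_contains (krogi : List (Int × Int × Int)) (x : Int × Int × Int) :
    (vsebovanost krogi).1.contains x = true
    ↔ x ∈ krogi ∧ ∃ e ∈ krogi, pvCont x e = true := by
  unfold vsebovanost
  rw [pv_outer_contains]
  simp only [PySem.Dict.contains_empty, Bool.false_or, List.any_eq_true, beq_iff_eq,
    Bool.and_eq_true]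
  constructor
  · rintro ⟨k0, hk0, rfl, e, he, hc⟩
    exact ⟨hk0, e, he, hc⟩
  · rintro ⟨hm, e, he, hc⟩
    exact ⟨x, hm, rfl, e, he, hc⟩

-- the setdefault performed by 'vsebuje[krog]' changes no stored list and no key but krog
theorem pv_setdefault_getD (d : PySem.Dict (Int × Int × Int) (List (Int × Int × Int)))
    (k x : Int × Int × Int) :
    (d.setdefault k []).getD x [] = d.getD x [] := by
  cases hc : d.contains k
  · rw [PySem.Dict.setdefault_of_not_contains d [] hc, PySem.Dict.getD_insert]
    split_ifs with hx
    · subst hx; rw [PySem.Dict.getD_of_not_contains d [] hc]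
    · rfl
  · rw [PySem.Dict.setdefault_of_contains d [] hc]

theorem pv_setdefault_contains (d : PySem.Dict (Int × Int × Int) (List (Int × Int × Int)))
    (k x : Int × Int × Int) (hx : x ≠ k) :
    (d.setdefault k []).contains x = d.contains x := by
  cases hc : d.contains k
  · rw [PySem.Dict.setdefault_of_not_contains d [] hc, PySem.Dict.contains_insert]
    simp [hx]
  · rw [PySem.Dict.setdefault_of_contains d [] hc]

-- the distorted-count condition, resolved into its two concrete shapes
theorem pv_xor_cases (m L : Nat) (hm : 1 ≤ m)
    (h : ¬ (m * L = 2 ↔ L = 2)) : (m = 2 ∧ L = 1) ∨ (2 ≤ m ∧ L = 2) := by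
  by_cases hL2 : L = 2
  · subst hL2
    right
    exact ⟨by omega, rfl⟩
  · left
    have hP : m * L = 2 := by tauto
    have hle : L ≤ m * L := Nat.le_mul_of_pos_left L hm
    have hL1 : L = 1 := by
      have hL0 : L ≠ 0 := by rintro rfl; simp at hP
      omega
    subst hL1
    rw [Nat.mul_one] at hP
    exact ⟨hP, rfl⟩

-- the letala loop with the threaded dict equals the index-free loop that keeps A's per-pair count
theorem pv_loopC (krogi rest : List (Int × Int × Int))
    (d : PySem.Dict (Int × Int × Int) (List (Int × Int × Int)))
    (out : PySem.Set (Int × Int))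
    (hrest : ∀ x ∈ rest, x ∈ krogi)
    (hgd : ∀ x, d.getD x [] = (vsebovanost krogi).1.getD x [])
    (hct : ∀ x, (∃ k0 ∈ krogi, pvCont k0 x = true) →
      d.contains x = (vsebovanost krogi).1.contains x) :
    (rest.foldl (fun st krog =>
      if PySem.Set.contains (vsebovanost krogi).2 krog = false then
        if ((st.1.setdefault krog []).getD krog []).length ≠ 2 ∧
            ((st.1.setdefault krog []).getD krog []).length ≠ 0 then
          if ((st.1.setdefault krog []).getD krog []).any
              (fun vkrog => (st.1.setdefault krog []).contains vkrog) then
            (st.1.setdefault krog [], st.2)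
          else (st.1.setdefault krog [], st.2.add (krog.1, krog.2.1))
        else (st.1.setdefault krog [], st.2)
      else st) (d, out)).2
    = rest.foldl (fun rezultat c =>
        if krogi.any (fun o => pvCont o c) then rezultat
        else if (krogi.count c * (krogi.filter (fun d => pvCont c d)).length = 0
              ∨ krogi.count c * (krogi.filter (fun d => pvCont c d)).length = 2) then
          rezultat
        else if (krogi.filter (fun d => pvCont c d)).any
            (fun k => krogi.any (fun e => pvCont k e)) then rezultat
        else rezultat.add (c.1, c.2.1)) out := by
  induction rest generalizing d out with
  | nil => rfl
  | cons krog t ih =>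
    simp only [List.foldl_cons]
    have hkrog : krog ∈ krogi := hrest krog (List.mem_cons_self)
    have hrest' : ∀ x ∈ t, x ∈ krogi := fun x hx => hrest x (List.mem_cons_of_mem _ hx)
    by_cases hP : ∃ k0 ∈ krogi, pvCont k0 krog = true
    · -- krog is notranji: both loops skip it, state unchanged
      have hA : PySem.Set.contains (vsebovanost krogi).2 krog = true :=
        (PySem.Set.contains_iff _ _).mpr ((pv_vseb_mem krogi krog).mpr ⟨hkrog, hP⟩)
      have hB : krogi.any (fun o => pvCont o krog) = true := by
        rw [List.any_eq_true]; obtain ⟨k0, hk0, hc⟩ := hP; exact ⟨k0, hk0, hc⟩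
      have hA' : ¬ (PySem.Set.contains (vsebovanost krogi).2 krog = false) := by
        rw [hA]; simp
      rw [if_neg hA', if_pos hB]
      exact ih d out hrest' hgd hct
    · -- krog is an outermost circle
      have hA : PySem.Set.contains (vsebovanost krogi).2 krog = false := by
        rw [Bool.eq_false_iff]
        intro h
        exact hP ((pv_vseb_mem krogi krog).mp ((PySem.Set.contains_iff _ _).mp h)).2
      have hB' : ¬ ((krogi.any fun o => pvCont o krog) = true) := by
        intro h
        obtain ⟨k0, hk0, hc⟩ := List.any_eq_true.mp h
        exact hP ⟨k0, hk0, hc⟩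
      rw [if_pos hA, if_neg hB']
      -- the threaded dict after the defaultdict lookup
      have hgd' : ∀ x, (d.setdefault krog []).getD x [] = (vsebovanost krogi).1.getD x [] :=
        fun x => (pv_setdefault_getD d krog x).trans (hgd x)
      have hct' : ∀ x, (∃ k0 ∈ krogi, pvCont k0 x = true) →
          (d.setdefault krog []).contains x = (vsebovanost krogi).1.contains x := by
        intro x hx
        have hne : x ≠ krog := fun he => hP (he ▸ hx)
        rw [pv_setdefault_contains d krog x hne]
        exact hct x hx
      -- the stored children list, its length, and its membership
      have hL : (d.setdefault krog []).getD krog []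
          = krogi.flatMap (fun k0 =>
              if k0 = krog then krogi.filter (fun k1 => pvCont krog k1) else []) :=
        (hgd' krog).trans (pv_vseb_getD krogi krog)
      have hlen : ((d.setdefault krog []).getD krog []).length
          = krogi.count krog * (krogi.filter (fun k1 => pvCont krog k1)).length := by
        rw [hL, pv_flat_len]
      -- the leaf test: A scans the stored list against the dict keys, B rescans the input
      have hmemL : ∀ v, v ∈ (d.setdefault krog []).getD krog []
          ↔ v ∈ krogi.filter (fun d => pvCont krog d) := by
        intro v
        rw [hL, pv_flat_mem]
        exact ⟨fun h => h.2, fun h => ⟨hkrog, h⟩⟩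
      have hpt : ∀ v ∈ krogi.filter (fun d => pvCont krog d),
          (d.setdefault krog []).contains v = krogi.any (fun e => pvCont v e) := by
        intro v hv
        obtain ⟨hvm, hvc⟩ := List.mem_filter.mp hv
        have hPv : ∃ k0 ∈ krogi, pvCont k0 v = true := ⟨krog, hkrog, hvc⟩
        have hne : v ≠ krog := fun he => hP (he ▸ hPv)
        rw [pv_setdefault_contains d krog v hne, hct v hPv]
        cases hb : krogi.any (fun e => pvCont v e)
        · rw [Bool.eq_false_iff]
          intro h
          obtain ⟨-, e, he, hc⟩ := (pv_vseb_contains krogi v).mp h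
          rw [Bool.eq_false_iff] at hb
          exact hb (List.any_eq_true.mpr ⟨e, he, hc⟩)
        · exact (pv_vseb_contains krogi v).mpr ⟨hvm, List.any_eq_true.mp hb⟩
      have hany : ((d.setdefault krog []).getD krog []).any
            (fun vkrog => (d.setdefault krog []).contains vkrog)
          = (krogi.filter (fun d => pvCont krog d)).any
            (fun k => krogi.any (fun e => pvCont k e)) := by
        cases hb : (krogi.filter (fun d => pvCont krog d)).any
            (fun k => krogi.any (fun e => pvCont k e))
        · rw [Bool.eq_false_iff]
          intro h
          obtain ⟨v, hvL, hvc⟩ := List.any_eq_true.mp h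
          have hv := (hmemL v).mp hvL
          rw [Bool.eq_false_iff] at hb
          exact hb (List.any_eq_true.mpr ⟨v, hv, by rw [← hpt v hv]; exact hvc⟩)
        · obtain ⟨v, hv, hvc⟩ := List.any_eq_true.mp hb
          exact List.any_eq_true.mpr ⟨v, (hmemL v).mpr hv, by rw [hpt v hv]; exact hvc⟩
      by_cases hcnt : krogi.count krog * (krogi.filter (fun d => pvCont krog d)).length = 0
          ∨ krogi.count krog * (krogi.filter (fun d => pvCont krog d)).length = 2
      · -- the stored-list count is 0 or 2: both sides skip
        have hAskip : ¬ (((d.setdefault krog []).getD krog []).length ≠ 2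
            ∧ ((d.setdefault krog []).getD krog []).length ≠ 0) := by
          omega
        rw [if_neg hAskip, if_pos hcnt]
        exact ih (d.setdefault krog []) out hrest' hgd' hct'
      · -- the count passes: both sides run the leaf test
        have hAgo : ((d.setdefault krog []).getD krog []).length ≠ 2
            ∧ ((d.setdefault krog []).getD krog []).length ≠ 0 := by
          omega
        rw [if_pos hAgo, if_neg hcnt, hany]
        cases hleaf : (krogi.filter (fun d => pvCont krog d)).any
            (fun k => krogi.any (fun e => pvCont k e)) with
        | true =>
          rw [if_pos rfl, if_pos rfl]
          exact ih (d.setdefault krog []) out hrest' hgd' hct'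
        | false =>
          rw [if_neg (show ¬ ((false : Bool) = true) by simp),
            if_neg (show ¬ ((false : Bool) = true) by simp)]
          exact ih (d.setdefault krog []) (PySem.Set.add out (krog.1, krog.2.1)) hrest' hgd' hct'

-- fold congruence: pointwise-equal step functions give equal folds
theorem pv_foldl_congr {α β : Type} (l : List α) (f g : β → α → β) (b : β)
    (h : ∀ a ∈ l, ∀ x, f x a = g x a) : l.foldl f b = l.foldl g b := by
  induction l generalizing b with
  | nil => rfl
  | cons a t ih =>
    simp only [List.foldl_cons]
    rw [h a List.mem_cons_self]
    exact ih _ (fun a ha x => h a (List.mem_cons_of_mem _ ha) x)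

-- the two add-conditions, as single booleans
def pvAddA (krogi : List (Int × Int × Int)) (c : Int × Int × Int) : Bool :=
  !(krogi.any fun o => pvCont o c) &&
  !(decide (krogi.count c * (krogi.filter (fun d => pvCont c d)).length = 0
      ∨ krogi.count c * (krogi.filter (fun d => pvCont c d)).length = 2)) &&
  !((krogi.filter (fun d => pvCont c d)).any fun k => krogi.any fun e => pvCont k e)

def pvAddB (krogi : List (Int × Int × Int)) (c : Int × Int × Int) : Bool :=
  !(krogi.any fun o => pvCont o c) &&
  !(decide ((krogi.filter (fun d => pvCont c d)).length = 0
      ∨ (krogi.filter (fun d => pvCont c d)).length = 2)) &&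
  !((krogi.filter (fun d => pvCont c d)).any fun k => krogi.any fun e => pvCont k e)

theorem pv_stepA (krogi : List (Int × Int × Int)) (c : Int × Int × Int)
    (r : PySem.Set (Int × Int)) :
    (if krogi.any (fun o => pvCont o c) then r
     else if (krogi.count c * (krogi.filter (fun d => pvCont c d)).length = 0
           ∨ krogi.count c * (krogi.filter (fun d => pvCont c d)).length = 2) then r
     else if (krogi.filter (fun d => pvCont c d)).any
         (fun k => krogi.any (fun e => pvCont k e)) then r
     else r.add (c.1, c.2.1))
    = if pvAddA krogi c then r.add (c.1, c.2.1) else r := by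
  unfold pvAddA
  by_cases h1 : (krogi.any fun o => pvCont o c) = true
  · rw [if_pos h1, h1]; simp
  · rw [if_neg h1]
    have h1' : (krogi.any fun o => pvCont o c) = false := Bool.eq_false_iff.mpr h1
    by_cases h2 : krogi.count c * (krogi.filter (fun d => pvCont c d)).length = 0
        ∨ krogi.count c * (krogi.filter (fun d => pvCont c d)).length = 2
    · rw [if_pos h2, h1', decide_eq_true h2]; simp
    · rw [if_neg h2]
      by_cases h3 : ((krogi.filter (fun d => pvCont c d)).any
          fun k => krogi.any fun e => pvCont k e) = true
      · rw [if_pos h3, h1', decide_eq_false h2, h3]; simp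
      · have h3' : ((krogi.filter (fun d => pvCont c d)).any
            fun k => krogi.any fun e => pvCont k e) = false := Bool.eq_false_iff.mpr h3
        rw [if_neg h3, h1', decide_eq_false h2, h3']; simp

theorem pv_stepB (krogi : List (Int × Int × Int)) (c : Int × Int × Int)
    (r : PySem.Set (Int × Int)) :
    (if krogi.any (fun o => pvCont o c) then r
     else if ((krogi.filter (fun d => pvCont c d)).length = 0
           ∨ (krogi.filter (fun d => pvCont c d)).length = 2) then r
     else if (krogi.filter (fun d => pvCont c d)).any
         (fun k => krogi.any (fun e => pvCont k e)) then r
     else r.add (c.1, c.2.1))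
    = if pvAddB krogi c then r.add (c.1, c.2.1) else r := by
  unfold pvAddB
  by_cases h1 : (krogi.any fun o => pvCont o c) = true
  · rw [if_pos h1, h1]; simp
  · rw [if_neg h1]
    have h1' : (krogi.any fun o => pvCont o c) = false := Bool.eq_false_iff.mpr h1
    by_cases h2 : (krogi.filter (fun d => pvCont c d)).length = 0
        ∨ (krogi.filter (fun d => pvCont c d)).length = 2
    · rw [if_pos h2, h1', decide_eq_true h2]; simp
    · rw [if_neg h2]
      by_cases h3 : ((krogi.filter (fun d => pvCont c d)).any
          fun k => krogi.any fun e => pvCont k e) = true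
      · rw [if_pos h3, h1', decide_eq_false h2, h3]; simp
      · have h3' : ((krogi.filter (fun d => pvCont c d)).any
            fun k => krogi.any fun e => pvCont k e) = false := Bool.eq_false_iff.mpr h3
        rw [if_neg h3, h1', decide_eq_false h2, h3']; simp

-- membership in a conditional-add fold
theorem pv_fold_mem (cond : (Int × Int × Int) → Bool) (rest : List (Int × Int × Int))
    (out : PySem.Set (Int × Int)) (z : Int × Int) :
    z ∈ rest.foldl (fun r c => if cond c then PySem.Set.add r (c.1, c.2.1) else r) out
    ↔ z ∈ out ∨ ∃ k ∈ rest, cond k = true ∧ (k.1, k.2.1) = z := by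
  induction rest generalizing out with
  | nil => simp
  | cons c t ih =>
    simp only [List.foldl_cons]
    by_cases h : cond c = true
    · rw [if_pos h, ih]
      simp only [PySem.Set.mem_add, List.mem_cons]
      constructor
      · rintro ((hz | rfl) | ⟨k, hk, hc, he⟩)
        · exact Or.inl hz
        · exact Or.inr ⟨c, Or.inl rfl, h, rfl⟩
        · exact Or.inr ⟨k, Or.inr hk, hc, he⟩
      · rintro (hz | ⟨k, (rfl | hk), hc, he⟩)
        · exact Or.inl (Or.inl hz)
        · exact Or.inl (Or.inr he.symm)
        · exact Or.inr ⟨k, hk, hc, he⟩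
    · rw [if_neg h, ih]
      simp only [List.mem_cons]
      constructor
      · rintro (hz | ⟨k, hk, hc, he⟩)
        · exact Or.inl hz
        · exact Or.inr ⟨k, Or.inr hk, hc, he⟩
      · rintro (hz | ⟨k, (rfl | hk), hc, he⟩)
        · exact Or.inl hz
        · exact absurd hc h
        · exact Or.inr ⟨k, hk, hc, he⟩

-- membership characterizations of the two outputs
theorem pv_letala_mem (krogi : List (Int × Int × Int)) (z : Int × Int) :
    z ∈ letala krogi ↔ ∃ k ∈ krogi, pvAddA krogi k = true ∧ (k.1, k.2.1) = z := by
  have h1 : letala krogi = krogi.foldl (fun rezultat c =>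
      if krogi.any (fun o => pvCont o c) then rezultat
      else if (krogi.count c * (krogi.filter (fun d => pvCont c d)).length = 0
            ∨ krogi.count c * (krogi.filter (fun d => pvCont c d)).length = 2) then rezultat
      else if (krogi.filter (fun d => pvCont c d)).any
          (fun k => krogi.any (fun e => pvCont k e)) then rezultat
      else rezultat.add (c.1, c.2.1)) PySem.Set.empty :=
    pv_loopC krogi krogi (vsebovanost krogi).1 PySem.Set.empty
      (fun x hx => hx) (fun x => rfl) (fun x _ => rfl)
  rw [h1, pv_foldl_congr krogi _
      (fun r c => if pvAddA krogi c then PySem.Set.add r (c.1, c.2.1) else r) _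
      (fun c _ r => pv_stepA krogi c r), pv_fold_mem]
  simp [PySem.Set.empty]

theorem pv_alt_mem (krogi : List (Int × Int × Int)) (z : Int × Int) :
    z ∈ letala_alt krogi ↔ ∃ k ∈ krogi, pvAddB krogi k = true ∧ (k.1, k.2.1) = z := by
  have h1 : letala_alt krogi = krogi.foldl
      (fun r c => if pvAddB krogi c then PySem.Set.add r (c.1, c.2.1) else r)
      PySem.Set.empty :=
    pv_foldl_congr krogi _ _ _ (fun c _ r => pv_stepB krogi c r)
  rw [h1, pv_fold_mem]
  simp [PySem.Set.empty]

-- outside D_, the two add-conditions agree on every circle of the list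
theorem pv_add_eq (krogi : List (Int × Int × Int)) (c : Int × Int × Int)
    (hc : c ∈ krogi) (hND : ¬ D_letala krogi) : pvAddA krogi c = pvAddB krogi c := by
  unfold pvAddA pvAddB
  by_cases h1 : (krogi.any fun o => pvCont o c) = true
  · simp [h1]
  · by_cases h3 : ((krogi.filter (fun d => pvCont c d)).any
        fun k => krogi.any fun e => pvCont k e) = true
    · simp [h3]
    · have h2 : (krogi.count c * (krogi.filter (fun d => pvCont c d)).length = 2
          ↔ (krogi.filter (fun d => pvCont c d)).length = 2) := by
        by_contra hx
        exact hND ⟨c, hc, Bool.eq_false_iff.mpr h1, Bool.eq_false_iff.mpr h3, hx⟩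
      have h0 : (krogi.count c * (krogi.filter (fun d => pvCont c d)).length = 0
          ↔ (krogi.filter (fun d => pvCont c d)).length = 0) := by
        have hm1 : 0 < krogi.count c := List.count_pos_iff.mpr hc
        rw [Nat.mul_eq_zero]
        omega
      have hdd : decide (krogi.count c * (krogi.filter (fun d => pvCont c d)).length = 0
            ∨ krogi.count c * (krogi.filter (fun d => pvCont c d)).length = 2)
          = decide ((krogi.filter (fun d => pvCont c d)).length = 0
            ∨ (krogi.filter (fun d => pvCont c d)).length = 2) := by
        simp only [decide_eq_decide]
        exact or_congr h0 h2
      rw [hdd]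

-- a circle of nonzero squared radius that is outermost shares its centre with no other
-- candidate: any same-centre circle is c itself, is strictly inside c, or contains nothing
theorem pv_center_unique (krogi : List (Int × Int × Int)) (c k : Int × Int × Int)
    (hcm : c ∈ krogi) (hkm : k ∈ krogi)
    (hI : (krogi.any fun o => pvCont o c) = false)
    (hcr : 0 < c.2.2 ^ 2) (hx : k.1 = c.1) (hy : k.2.1 = c.2.1) :
    k = c ∨ (pvAddA krogi k = false ∧ pvAddB krogi k = false) := by
  by_cases hck : pvCont c k = true
  · right
    have hinner : (krogi.any fun o => pvCont o k) = true :=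
      List.any_eq_true.mpr ⟨c, hcm, hck⟩
    constructor <;> simp [pvAddA, pvAddB, hinner]
  · have hcleq : c.2.2 ≤ k.2.2 := by
      by_contra hlt
      apply hck
      unfold pvCont
      rw [decide_eq_true_iff]
      refine ⟨by omega, ?_⟩
      rw [hx, hy]
      simpa using hcr
    have hkc : pvCont k c = false := by
      rw [Bool.eq_false_iff]
      intro h
      rw [Bool.eq_false_iff] at hI
      exact hI (List.any_eq_true.mpr ⟨k, hkm, h⟩)
    by_cases hr : k.2.2 = c.2.2
    · left
      obtain ⟨kx, ky, kr⟩ := k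
      obtain ⟨cx, cy, cr⟩ := c
      simp_all
    · -- c.r < k.r, yet k contains nothing: its squared radius is 0
      have hkr0 : k.2.2 ^ 2 = 0 := by
        by_contra h0
        rw [Bool.eq_false_iff] at hkc
        apply hkc
        unfold pvCont
        rw [decide_eq_true_iff]
        refine ⟨by omega, ?_⟩
        rw [hx, hy] at *
        have : 0 ≤ k.2.2 ^ 2 := sq_nonneg _
        simpa using by omega
      have hLk : (krogi.filter (fun d => pvCont k d)).length = 0 := by
        rw [List.length_eq_zero_iff, List.filter_eq_nil_iff]
        intro d _ hd
        unfold pvCont at hd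
        rw [decide_eq_true_iff] at hd
        have h1 := sq_nonneg (d.1 - k.1)
        have h2 := sq_nonneg (d.2.1 - k.2.1)
        omega
      right
      constructor
      · simp [pvAddA, hLk]
      · simp [pvAddB, hLk]

-- ===== VERDICT (by name: the statements are the Claim_ definitions above) =====
theorem letala_spec : Claim_unchanged_letala := by
  intro krogi _ hND
  show letala krogi = letala_alt krogi
  have h1 : letala krogi = krogi.foldl (fun rezultat c =>
      if krogi.any (fun o => pvCont o c) then rezultat
      else if (krogi.count c * (krogi.filter (fun d => pvCont c d)).length = 0
            ∨ krogi.count c * (krogi.filter (fun d => pvCont c d)).length = 2) then rezultat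
      else if (krogi.filter (fun d => pvCont c d)).any
          (fun k => krogi.any (fun e => pvCont k e)) then rezultat
      else rezultat.add (c.1, c.2.1)) PySem.Set.empty :=
    pv_loopC krogi krogi (vsebovanost krogi).1 PySem.Set.empty
      (fun x hx => hx) (fun x => rfl) (fun x _ => rfl)
  have h2 : letala_alt krogi = krogi.foldl (fun rezultat c =>
      if krogi.any (fun o => pvCont o c) then rezultat
      else if ((krogi.filter (fun d => pvCont c d)).length = 0
            ∨ (krogi.filter (fun d => pvCont c d)).length = 2) then rezultat
      else if (krogi.filter (fun d => pvCont c d)).any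
          (fun k => krogi.any (fun e => pvCont k e)) then rezultat
      else rezultat.add (c.1, c.2.1)) PySem.Set.empty := rfl
  rw [h1, h2]
  exact pv_foldl_congr krogi _ _ _ (fun c hc r => by
    rw [pv_stepA, pv_stepB, pv_add_eq krogi c hc hND])

theorem letala_changed : Claim_changed_letala := by unfold Claim_changed_letala; decide

theorem letala_tight : Claim_exact_letala := by
  intro krogi _ hD heq
  obtain ⟨c, hc, hI, hleaf, harith⟩ := hD
  have hleaf' : ((krogi.filter (fun d => pvCont c d)).any
      fun k => krogi.any fun e => pvCont k e) = false := hleaf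
  have hcases := pv_xor_cases (krogi.count c)
    ((krogi.filter (fun d => pvCont c d)).length) (List.count_pos_iff.mpr hc) harith
  -- c contains something, so its squared radius is positive
  have hLpos : 0 < (krogi.filter (fun d => pvCont c d)).length := by
    rcases hcases with ⟨-, h⟩ | ⟨-, h⟩ <;> omega
  have hcr : 0 < c.2.2 ^ 2 := by
    obtain ⟨d0, hd0⟩ := List.exists_mem_of_length_pos hLpos
    have hcd := (List.mem_filter.mp hd0).2
    unfold pvCont at hcd
    rw [decide_eq_true_iff] at hcd
    have h1 := sq_nonneg (d0.1 - c.1)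
    have h2 := sq_nonneg (d0.2.1 - c.2.1)
    omega
  -- (c.1, c.2.1) enters an output exactly when c's own add-condition fires
  have hext : ∀ k ∈ krogi, (k.1, k.2.1) = (c.1, c.2.1) →
      k = c ∨ (pvAddA krogi k = false ∧ pvAddB krogi k = false) := by
    intro k hk hz
    obtain ⟨hx, hy⟩ := Prod.ext_iff.mp hz
    exact pv_center_unique krogi c k hc hk hI hcr hx hy
  have hAmem : (c.1, c.2.1) ∈ letala krogi ↔ pvAddA krogi c = true := by
    rw [pv_letala_mem]
    constructor
    · rintro ⟨k, hk, hA, hz⟩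
      rcases hext k hk hz with rfl | ⟨hf, -⟩
      · exact hA
      · rw [hf] at hA; cases hA
    · intro h; exact ⟨c, hc, h, rfl⟩
  have hBmem : (c.1, c.2.1) ∈ letala_alt krogi ↔ pvAddB krogi c = true := by
    rw [pv_alt_mem]
    constructor
    · rintro ⟨k, hk, hB, hz⟩
      rcases hext k hk hz with rfl | ⟨-, hf⟩
      · exact hB
      · rw [hf] at hB; cases hB
    · intro h; exact ⟨c, hc, h, rfl⟩
  rcases hcases with ⟨hm2', hL1'⟩ | ⟨hm2', hL2'⟩
  · -- two copies with one child: A drops c, B keeps it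
    have hAc : pvAddA krogi c = false := by
      simp [pvAddA, hL1', hm2']
    have hBc : pvAddB krogi c = true := by
      simp [pvAddB, hL1', hI, hleaf']
    have : (c.1, c.2.1) ∈ letala_alt krogi := hBmem.mpr hBc
    rw [← heq, hAmem, hAc] at this
    cases this
  · -- ≥2 copies with two children: A keeps c, B drops it
    have hAc : pvAddA krogi c = true := by
      simp [pvAddA, hL2', hI, hleaf']
      omega
    have hBc : pvAddB krogi c = false := by
      simp [pvAddB, hL2']
    have : (c.1, c.2.1) ∈ letala krogi := hAmem.mpr hAc
    rw [heq, hBmem, hBc] at this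
    cases this
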